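-- pv_equiv track=rewrite | github.com/TBillTech/ghostwriter | ghostwriter/touch_point.py | _brainstorm_has_done
-- ===== SOURCE A (Python) =====
-- def _brainstorm_has_done(text: str) -> bool:
--     if text is None:
--         return False
--     try:
--         lines = [ln.strip() for ln in str(text).splitlines() if ln.strip()]
--         if not lines:
--             return False
--         return lines[-1].strip().upper() == "DONE"
--     except Exception:
--         return False
-- ===== SOURCE B (Python) =====
-- def _brainstorm_has_done(text: str) -> bool:
--     if text is None:
--         return False
--     try:
--         for ln in reversed(str(text).splitlines()):
--             s = ln.strip()
--             if s:
--                 return s.upper() == "DONE"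
--         return False
--     except Exception:
--         return False
-- ===== Notes on version B (the rewrite author's own statement) =====
-- stated objective: simpler
-- what changed: Replaces building the full filtered list of stripped non-empty lines and indexing [-1] with a single reverse early-exit loop that returns on the first non-empty line.
import Mathlib
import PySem

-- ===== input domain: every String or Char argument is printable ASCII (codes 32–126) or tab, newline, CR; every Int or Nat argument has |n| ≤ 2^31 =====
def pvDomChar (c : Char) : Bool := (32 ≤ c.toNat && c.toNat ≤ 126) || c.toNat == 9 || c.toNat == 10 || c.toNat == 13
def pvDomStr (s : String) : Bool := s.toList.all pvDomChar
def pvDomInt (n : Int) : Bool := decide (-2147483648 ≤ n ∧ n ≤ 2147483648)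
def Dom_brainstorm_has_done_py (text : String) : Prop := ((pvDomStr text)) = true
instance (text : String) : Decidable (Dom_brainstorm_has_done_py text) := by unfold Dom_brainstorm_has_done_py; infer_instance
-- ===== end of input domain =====

-- B replaces the filtered-list-and-index-[-1] with a reverse early-exit loop; same return value.
-- ===== PORT A =====
def brainstorm_has_done_py (text : String) : Bool :=
  let lines := ((PySem.Str.splitlines text).filter
      (fun ln => PySem.Str.strip ln ≠ "")).map PySem.Str.strip
  if lines = [] then false
  else match PySem.List.pyGet? lines (-1) with
    | none => false
    | some last => PySem.Str.upper (PySem.Str.strip last) == "DONE"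

-- ===== PORT B =====
-- scan the reversed line list, return at the first non-empty stripped line
def pvAltLoop : List String → Bool
  | [] => false
  | ln :: rest =>
    let s := PySem.Str.strip ln
    if s = "" then pvAltLoop rest else PySem.Str.upper s == "DONE"

def brainstorm_has_done_py_alt (text : String) : Bool :=
  pvAltLoop (PySem.Str.splitlines text).reverse

-- ===== PRECONDITION & SPEC =====
def Spec_brainstorm_has_done_py (text : String) (out : Bool) : Prop := out = brainstorm_has_done_py_alt text
instance (text : String) (out : Bool) : Decidable (Spec_brainstorm_has_done_py text out) := by unfold Spec_brainstorm_has_done_py; infer_instance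

-- ===== CLAIM (what is proved, stated in full; the proofs are below) =====
def Claim_equal_brainstorm_has_done_py : Prop := ∀ (text : String), Dom_brainstorm_has_done_py text → Spec_brainstorm_has_done_py text (brainstorm_has_done_py text)

-- ===== LEMMAS AND PROOFS =====

lemma dw_idem {α} (p : α → Bool) (l : List α) :
    (l.dropWhile p).dropWhile p = l.dropWhile p := by
  induction l with
  | nil => simp
  | cons a t ih =>
    by_cases h : p a = true
    · simpa [List.dropWhile, h] using ih
    · simp [List.dropWhile, h]

lemma dw_prefix {α} (p : α → Bool) (l l' : List α)
    (hl : l.dropWhile p = l) (hp : l' <+: l) : l'.dropWhile p = l' := by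
  cases l' with
  | nil => simp
  | cons a t =>
    obtain ⟨r, hr⟩ := hp
    cases l with
    | nil => simp at hr
    | cons b u =>
      have hab : a = b := by
        have := congrArg List.head? hr
        simpa using this
      subst hab
      by_cases h : p a = true
      · rw [List.dropWhile_cons_of_pos h] at hl
        have hle := List.length_dropWhile_le (p := p) (l := u)
        have := congrArg List.length hl
        simp at this
        omega
      · simp [List.dropWhile_cons_of_neg h]

lemma strip_idem (s : List Char) :
    PySem.Chars.strip (PySem.Chars.strip s) = PySem.Chars.strip s := by
  unfold PySem.Chars.strip PySem.Chars.lstrip PySem.Chars.rstrip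
  set p := PySem.Chars.isspace
  set u := s.dropWhile p with hu
  have hui : u.dropWhile p = u := by rw [hu]; exact dw_idem p s
  have hpre : (u.reverse.dropWhile p).reverse <+: u := by
    obtain ⟨r, hr⟩ := List.dropWhile_suffix (l := u.reverse) p
    exact ⟨r.reverse, by
      have := congrArg List.reverse hr
      simpa using this⟩
  have h1 : ((u.reverse.dropWhile p).reverse).dropWhile p = (u.reverse.dropWhile p).reverse :=
    dw_prefix p u _ hui hpre
  rw [h1]
  simp [dw_idem]

lemma strip_idem_str (x : String) :
    PySem.Str.strip (PySem.Str.strip x) = PySem.Str.strip x := by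
  have h : (PySem.Str.strip (PySem.Str.strip x)).toList = (PySem.Str.strip x).toList := by
    simp [strip_idem]
  exact String.toList_inj.mp h

-- ===== VERDICT (by name: the statement is the Claim_ definition above) =====
lemma pv_key (l : List String) :
    (if ((l.filter (fun ln => PySem.Str.strip ln ≠ "")).map PySem.Str.strip) = [] then false
     else match PySem.List.pyGet? ((l.filter (fun ln => PySem.Str.strip ln ≠ "")).map PySem.Str.strip) (-1) with
       | none => false
       | some last => PySem.Str.upper (PySem.Str.strip last) == "DONE")
    = pvAltLoop l.reverse := by
  induction l using List.reverseRecOn with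
  | nil => simp [pvAltLoop]
  | append_singleton l x ih =>
    by_cases hx : PySem.Str.strip x = ""
    · simpa [List.filter_append, hx, pvAltLoop] using ih
    · simp [List.filter_append, hx, pvAltLoop, PySem.List.pyGet?, PySem.List.pyIdx?, strip_idem_str]

theorem brainstorm_has_done_py_spec : Claim_equal_brainstorm_has_done_py := by
  intro text _
  unfold Spec_brainstorm_has_done_py brainstorm_has_done_py brainstorm_has_done_py_alt
  exact pv_key (PySem.Str.splitlines text)
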